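-- pv_equiv track=rewrite | github.com/supertrip86/HW4 | CLUSTER_MOD.py | df_words_dict
-- ===== SOURCE A (Python) =====
-- def df_words_dict(list_agg,all_adjectives):
--
--     d_adj={}
--
--     for i in range(len(list_agg)):
--
--         support_list=[]
--
--         for element in all_adjectives:
--
--             if element in list_agg[i]:
--
--                 support_list.append(1)
--
--             else:
--
--                 support_list.append(0)
--
--
--         d_adj[i]=support_list
--
--
--     return d_adj
-- ===== SOURCE B (Python) =====
-- def df_words_dict(list_agg, all_adjectives):
--     # Invert the adjective list once: adjective -> all column positions (handles duplicates).
--     index = {}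
--     for pos, adj in enumerate(all_adjectives):
--         index.setdefault(adj, []).append(pos)
--     n = len(all_adjectives)
--     d_adj = {}
--     for i, item in enumerate(list_agg):
--         vec = [0] * n
--         for element in item:
--             for p in index.get(element, []):
--                 vec[p] = 1
--         d_adj[i] = vec
--     return d_adj
-- ===== Notes on version B (the rewrite author's own statement) =====
-- stated objective: faster
-- what changed: Instead of rescanning all_adjectives and doing a membership test in the item for every column, B inverts all_adjectives once into a dict mapping each adjective to its list of positions, then fills a zero-initialized vector per item by walking the item's own elements and setting 1 at each recorded position.
import Mathlib
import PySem

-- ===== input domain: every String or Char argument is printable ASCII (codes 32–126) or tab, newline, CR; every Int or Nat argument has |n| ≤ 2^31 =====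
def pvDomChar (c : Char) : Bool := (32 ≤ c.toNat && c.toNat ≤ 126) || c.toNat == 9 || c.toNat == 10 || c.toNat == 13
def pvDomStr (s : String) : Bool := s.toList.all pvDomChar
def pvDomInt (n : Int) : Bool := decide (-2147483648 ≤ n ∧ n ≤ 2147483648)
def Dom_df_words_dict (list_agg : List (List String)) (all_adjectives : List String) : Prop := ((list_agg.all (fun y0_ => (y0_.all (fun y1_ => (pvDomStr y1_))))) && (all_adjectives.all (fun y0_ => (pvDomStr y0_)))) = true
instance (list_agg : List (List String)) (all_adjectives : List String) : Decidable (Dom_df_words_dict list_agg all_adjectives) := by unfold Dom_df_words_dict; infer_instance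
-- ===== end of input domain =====

-- B inverts all_adjectives into a position index once and fills a zero vector per item; alternative decomposition, same results.


-- ===== PORT A =====
-- for i in range(len(list_agg)): support_list = []; for element in all_adjectives: append 1/0; d_adj[i] = support_list
def df_words_dict (list_agg : List (List String)) (all_adjectives : List String) : List (Int × List Int) :=
  ((PySem.List.pyRange 0 (list_agg.length : Int) 1).foldl
    (fun (d : PySem.Dict Int (List Int)) i =>
      let support_list := all_adjectives.foldl
        (fun acc element =>
          if element ∈ PySem.List.pyGetD list_agg i [] then acc ++ [(1 : Int)] else acc ++ [(0 : Int)]) []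
      d.insert i support_list)
    PySem.Dict.empty).items

-- ===== PORT B =====
-- index = {}; for pos, adj in enumerate(all_adjectives): index.setdefault(adj, []).append(pos)
-- then per item: vec = [0]*n; for element in item: for p in index.get(element, []): vec[p] = 1
-- (positions p come from enumerate, so 0 ≤ p and p.toNat is exact, and p < n so List.set never clips)
def df_words_dict_alt (list_agg : List (List String)) (all_adjectives : List String) : List (Int × List Int) :=
  let index : PySem.Dict String (List Int) :=
    (PySem.List.enumerate all_adjectives 0).foldl
      (fun d p => d.modify p.2 [] (· ++ [p.1])) PySem.Dict.empty
  let n := all_adjectives.length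
  ((PySem.List.enumerate list_agg 0).foldl
    (fun (d : PySem.Dict Int (List Int)) q =>
      let vec := q.2.foldl
        (fun v element => (index.getD element []).foldl (fun v p => v.set p.toNat 1) v)
        (List.replicate n (0 : Int))
      d.insert q.1 vec)
    PySem.Dict.empty).items

-- ===== PRECONDITION & SPEC =====
def Spec_df_words_dict (list_agg : List (List String)) (all_adjectives : List String) (out : List (Int × List Int)) : Prop := out = df_words_dict_alt list_agg all_adjectives
instance (list_agg : List (List String)) (all_adjectives : List String) (out : List (Int × List Int)) : Decidable (Spec_df_words_dict list_agg all_adjectives out) := by unfold Spec_df_words_dict; infer_instance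

-- ===== CLAIM (what is proved, stated in full; the proofs are below) =====
def Claim_equal_df_words_dict : Prop := ∀ (list_agg : List (List String)) (all_adjectives : List String), Dom_df_words_dict list_agg all_adjectives → Spec_df_words_dict list_agg all_adjectives (df_words_dict list_agg all_adjectives)

-- ===== LEMMAS AND PROOFS =====

-- B's inverted index, named for the proofs
def pvIndex (all_adjectives : List String) : PySem.Dict String (List Int) :=
  (PySem.List.enumerate all_adjectives 0).foldl
    (fun d p => d.modify p.2 [] (· ++ [p.1])) PySem.Dict.empty

lemma pvIndex_getD (all_adjectives : List String) (a : String) :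
    (pvIndex all_adjectives).getD a []
      = (((PySem.List.enumerate all_adjectives 0).map Prod.swap).filter (fun q => q.1 == a)).map (·.2) := by
  unfold pvIndex
  rw [show ((PySem.List.enumerate all_adjectives 0).foldl
      (fun d p => d.modify p.2 [] (· ++ [p.1])) PySem.Dict.empty)
    = (((PySem.List.enumerate all_adjectives 0).map Prod.swap).foldl
      (fun d q => d.modify q.1 [] (· ++ [q.2])) PySem.Dict.empty) from by rw [List.foldl_map]; rfl]
  rw [PySem.Dict.getD_foldl_modify_append]
  simp

-- a position j is recorded under adjective a iff all_adjectives[j] = a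
lemma pvIndex_mem (all_adjectives : List String) (a : String) (j : Int) :
    j ∈ (pvIndex all_adjectives).getD a []
      ↔ ∃ (k : Nat) (h : k < all_adjectives.length), all_adjectives[k] = a ∧ j = (k : Int) := by
  rw [pvIndex_getD]
  simp only [List.mem_map, List.mem_filter, List.mem_map, PySem.List.mem_enumerate_iff]
  constructor
  · rintro ⟨x, ⟨⟨p, ⟨k, hk, rfl⟩, rfl⟩, ha⟩, rfl⟩
    exact ⟨k, hk, by simpa using ha, by simp⟩
  · rintro ⟨k, hk, ha, rfl⟩
    refine ⟨(all_adjectives[k], (k : Int)), ⟨⟨((k : Int), all_adjectives[k]), ⟨k, hk, by simp⟩, rfl⟩, by simpa using ha⟩, rfl⟩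

-- one inner "for p in positions: vec[p] = 1" pass
lemma mark_length (ps : List Int) (v : List Int) :
    (ps.foldl (fun v p => v.set p.toNat 1) v).length = v.length := by
  induction ps generalizing v with
  | nil => rfl
  | cons q t ih => simp [List.foldl_cons, ih]

lemma mark_getElem? (ps : List Int) (v : List Int) (j : Nat) (hj : j < v.length)
    (hnn : ∀ p ∈ ps, 0 ≤ p) :
    (ps.foldl (fun v p => v.set p.toNat 1) v)[j]?
      = some (if (j : Int) ∈ ps then 1 else v[j]'hj) := by
  induction ps generalizing v with
  | nil => simp [List.getElem?_eq_getElem hj]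
  | cons q t ih =>
    have hq : 0 ≤ q := hnn q (by simp)
    rw [List.foldl_cons, ih (v.set q.toNat 1) (by simpa using hj) (fun p hp => hnn p (by simp [hp]))]
    by_cases hmem : (j : Int) ∈ t
    · simp [hmem]
    · simp only [hmem, if_false, List.mem_cons, or_false]
      rw [List.getElem_set]
      by_cases he : (j : Int) = q
      · simp [he.symm]
      · have : ¬ q.toNat = j := by omega
        simp [he, this]

-- the whole per-item marking loop
lemma row_length (idx : PySem.Dict String (List Int)) (item : List String) (v : List Int) :
    (item.foldl (fun v element => (idx.getD element []).foldl (fun v p => v.set p.toNat 1) v) v).length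
      = v.length := by
  induction item generalizing v with
  | nil => rfl
  | cons e t ih => simp [List.foldl_cons, ih, mark_length]

lemma row_getElem? (idx : PySem.Dict String (List Int)) (item : List String) (v : List Int)
    (j : Nat) (hj : j < v.length)
    (hnn : ∀ a : String, ∀ p ∈ idx.getD a [], 0 ≤ p) :
    (item.foldl (fun v element => (idx.getD element []).foldl (fun v p => v.set p.toNat 1) v) v)[j]?
      = some (if ∃ e ∈ item, (j : Int) ∈ idx.getD e [] then 1 else v[j]'hj) := by
  induction item generalizing v with
  | nil => simp [List.getElem?_eq_getElem hj]
  | cons e t ih =>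
    have hlen : j < ((idx.getD e []).foldl (fun v p => v.set p.toNat 1) v).length := by
      rw [mark_length]; exact hj
    rw [List.foldl_cons, ih _ hlen]
    have h1 := mark_getElem? (idx.getD e []) v j hj (hnn e)
    rw [List.getElem?_eq_getElem hlen] at h1
    have h2 : ((idx.getD e []).foldl (fun v p => v.set p.toNat 1) v)[j]'hlen
        = if (j : Int) ∈ idx.getD e [] then 1 else v[j]'hj := Option.some.inj h1
    by_cases hmem : ∃ e' ∈ t, (j : Int) ∈ idx.getD e' []
    · simp [hmem]
    · simp only [hmem, if_false, h2]
      by_cases he : (j : Int) ∈ idx.getD e []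
      · simp [he]
      · simp only [he, if_false, List.mem_cons]
        rw [if_neg (by rintro ⟨e', he', hjj⟩; rcases List.mem_cons.mp he' with rfl | h; exact he hjj; exact hmem ⟨e', h, hjj⟩)]

-- B's row for one item equals A's 0/1 row
lemma row_eq (all_adjectives : List String) (item : List String) :
    (item.foldl (fun v element => ((pvIndex all_adjectives).getD element []).foldl
        (fun v p => v.set p.toNat 1) v) (List.replicate all_adjectives.length (0 : Int)))
      = all_adjectives.map (fun e => if e ∈ item then (1 : Int) else 0) := by
  have hnn : ∀ a : String, ∀ p ∈ (pvIndex all_adjectives).getD a [], 0 ≤ p := by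
    intro a p hp
    rcases (pvIndex_mem all_adjectives a p).mp hp with ⟨k, hk, _, rfl⟩
    exact Int.natCast_nonneg k
  apply List.ext_getElem?
  intro j
  by_cases hj : j < all_adjectives.length
  · rw [row_getElem? _ _ _ j (by simpa using hj) hnn]
    rw [List.getElem?_map, List.getElem?_eq_getElem hj]
    simp only [List.getElem_replicate, Option.map_some]
    congr 1
    by_cases hm : all_adjectives[j] ∈ item
    · rw [if_pos, if_pos hm]
      exact ⟨all_adjectives[j], hm, (pvIndex_mem _ _ _).mpr ⟨j, hj, rfl, rfl⟩⟩
    · rw [if_neg, if_neg hm]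
      rintro ⟨e, he, hje⟩
      rcases (pvIndex_mem _ _ _).mp hje with ⟨k, hk, hka, hjk⟩
      have : k = j := by omega
      exact hm (by subst this; rw [hka]; exact he)
  · rw [List.getElem?_eq_none, List.getElem?_eq_none]
    · simpa using hj
    · rw [row_length]; simpa using hj

-- both programs: the dict keys are the fresh indices 0..len-1, so .items is a map over those indices
lemma ports_eq (list_agg : List (List String)) (all_adjectives : List String) :
    df_words_dict list_agg all_adjectives = df_words_dict_alt list_agg all_adjectives := by
  unfold df_words_dict df_words_dict_alt
  dsimp only
  rw [show (PySem.List.enumerate all_adjectives 0).foldl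
      (fun d p => d.modify p.2 [] (· ++ [p.1])) PySem.Dict.empty = pvIndex all_adjectives from rfl]
  have hA := PySem.Dict.items_foldl_insert_fresh
        (l := PySem.List.pyRange 0 (list_agg.length : Int) 1)
        (k := fun (i : Int) => i)
        (v := fun (i : Int) => all_adjectives.foldl
          (fun acc element =>
            if element ∈ PySem.List.pyGetD list_agg i [] then acc ++ [(1 : Int)] else acc ++ [(0 : Int)]) [])
        (d := PySem.Dict.empty)
        (by intro a _; exact PySem.Dict.contains_empty a)
        (by simpa using PySem.List.nodup_pyRange_one 0 (list_agg.length : Int))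
  have hB := PySem.Dict.items_foldl_insert_fresh
        (l := PySem.List.enumerate list_agg 0)
        (k := fun (q : Int × List String) => q.1)
        (v := fun (q : Int × List String) => q.2.foldl
          (fun v element => ((pvIndex all_adjectives).getD element []).foldl (fun v p => v.set p.toNat 1) v)
          (List.replicate all_adjectives.length (0 : Int)))
        (d := PySem.Dict.empty)
        (by intro a _; exact PySem.Dict.contains_empty a.1)
        (by rw [PySem.List.map_fst_enumerate]; simpa using PySem.List.nodup_pyRange_one 0 (list_agg.length : Int))
  rw [hA, hB]
  rw [PySem.List.enumerate_eq_map_pyRange (d := []), List.map_map]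
  rw [show (PySem.Dict.empty : PySem.Dict Int (List Int)).items = [] from rfl]
  simp only [List.nil_append]
  apply List.map_congr_left
  intro i hi
  simp only [Function.comp]
  congr 1
  rw [row_eq]
  rw [PySem.List.foldl_congr_mem
        (l := all_adjectives) (init := ([] : List Int))
        (f := fun acc element => if element ∈ PySem.List.pyGetD list_agg i [] then acc ++ [(1 : Int)] else acc ++ [(0 : Int)])
        (g := fun acc element => acc ++ [if element ∈ PySem.List.pyGetD list_agg i [] then (1 : Int) else 0])
        (by intro acc x _; dsimp only; split_ifs <;> rfl)]
  rw [PySem.List.foldl_append_singleton_eq_map, List.nil_append]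

-- ===== VERDICT (by name: the statement is the Claim_ definition above) =====
theorem df_words_dict_spec : Claim_equal_df_words_dict := by
  intro list_agg all_adjectives _
  unfold Spec_df_words_dict
  exact ports_eq list_agg all_adjectives
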